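-- pv_equiv track=rewrite | github.com/fxbin/skill-hub | shu-shu-divination-engine/scripts/divination_engine.py | build_compound_summary
-- ===== SOURCE A (Python) =====
-- from typing import Any
--
-- def build_compound_summary(
--     breakdown: list[dict[str, Any]],
--     primary_index: int | None,
--     supporting_fragments: list[str],
-- ) -> dict[str, str]:
--     if primary_index is None:
--         return {
--             "this_round": "这轮还没有选出可直接进入起测的主问题。",
--             "selection_logic": "系统先做拆分，再按可执行性、起测锚点和短期判断价值排序。",
--         }
--     executable_count = sum(1 for item in breakdown if item["bucket"] == "executable")
--     adjacent_count = sum(1 for item in breakdown if item["bucket"] == "adjacent")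
--     risk_count = sum(1 for item in breakdown if item["bucket"] == "high-risk")
--     return {
--         "this_round": f"本轮先处理第 {primary_index + 1} 个子问题：{breakdown[primary_index]['question']}。",
--         "selection_logic": (
--             "主问题按可执行性、起测锚点和短期判断价值选择，不按提问顺序机械取第一句。"
--             f"其余问题中，可后续继续进入四术数的有 {max(executable_count - 1, 0)} 题，"
--             f"属于相邻体系的有 {adjacent_count} 题，需要先降风险的有 {risk_count} 题。"
--             + (f"另识别到 {len(supporting_fragments)} 条补充片段。" if supporting_fragments else "没有额外的补充信息片段。")
--         ),
--     }
-- ===== SOURCE B (Python) =====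
-- def build_compound_summary(
--     breakdown,
--     primary_index,
--     supporting_fragments,
-- ):
--     if primary_index is None:
--         return {
--             "this_round": "这轮还没有选出可直接进入起测的主问题。",
--             "selection_logic": "系统先做拆分，再按可执行性、起测锚点和短期判断价值排序。",
--         }
--     # one pass keeping a (executable, adjacent, high-risk) tally instead of three scans
--     e, a, r = 0, 0, 0
--     for item in breakdown:
--         b = item["bucket"]
--         if b == "executable":
--             e += 1
--         elif b == "adjacent":
--             a += 1
--         elif b == "high-risk":
--             r += 1
--     tail = (f"另识别到 {len(supporting_fragments)} 条补充片段。"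
--             if supporting_fragments else "没有额外的补充信息片段。")
--     parts = [
--         "主问题按可执行性、起测锚点和短期判断价值选择，不按提问顺序机械取第一句。",
--         "其余问题中，可后续继续进入四术数的有 ", str(max(e - 1, 0)), " 题，",
--         "属于相邻体系的有 ", str(a), " 题，需要先降风险的有 ", str(r), " 题。",
--         tail,
--     ]
--     return {
--         "this_round": "本轮先处理第 " + str(primary_index + 1) + " 个子问题："
--                       + breakdown[primary_index]["question"] + "。",
--         "selection_logic": "".join(parts),
--     }
-- ===== Notes on version B (the rewrite author's own statement) =====
-- stated objective: alternative
-- what changed: Replaces A's three separate sum(...) scans by one pass maintaining an (executable, adjacent, high-risk) tally triple, and assembles the selection_logic string by joining a list of segments instead of one concatenation expression.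
import Mathlib
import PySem

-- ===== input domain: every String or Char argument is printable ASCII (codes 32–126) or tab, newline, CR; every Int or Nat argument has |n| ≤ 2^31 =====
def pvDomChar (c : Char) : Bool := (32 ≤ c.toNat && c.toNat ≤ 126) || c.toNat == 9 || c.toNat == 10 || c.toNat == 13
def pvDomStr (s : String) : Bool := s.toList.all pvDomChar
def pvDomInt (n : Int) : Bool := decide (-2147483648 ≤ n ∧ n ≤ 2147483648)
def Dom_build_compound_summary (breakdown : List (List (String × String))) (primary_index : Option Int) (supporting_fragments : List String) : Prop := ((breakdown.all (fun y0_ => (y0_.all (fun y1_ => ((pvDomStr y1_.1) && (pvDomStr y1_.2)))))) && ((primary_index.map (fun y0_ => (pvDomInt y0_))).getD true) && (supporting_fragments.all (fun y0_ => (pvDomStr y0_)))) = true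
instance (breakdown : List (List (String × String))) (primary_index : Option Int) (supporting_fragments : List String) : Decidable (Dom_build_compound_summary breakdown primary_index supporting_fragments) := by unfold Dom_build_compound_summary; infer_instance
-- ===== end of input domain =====

-- B replaces A's three separate counting scans by one pass carrying an
-- (executable, adjacent, high-risk) tally triple, and joins a segment list
-- instead of one concatenation expression (objective: alternative).

-- ===== PORT A =====
-- dicts are assoc lists, lookup = first match; `.getD ""` is only reached outside Pre_ (KeyError in Python)
def pvBucket (item : List (String × String)) : String := (item.lookup "bucket").getD ""

def build_compound_summary (breakdown : List (List (String × String))) (primary_index : Option Int) (supporting_fragments : List String) : List (String × String) :=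
  match primary_index with
  | none =>
    [("this_round", "这轮还没有选出可直接进入起测的主问题。"),
     ("selection_logic", "系统先做拆分，再按可执行性、起测锚点和短期判断价值排序。")]
  | some idx =>
    let executable_count : Int := breakdown.foldl (fun acc item => if pvBucket item == "executable" then acc + 1 else acc) 0
    let adjacent_count : Int := breakdown.foldl (fun acc item => if pvBucket item == "adjacent" then acc + 1 else acc) 0
    let risk_count : Int := breakdown.foldl (fun acc item => if pvBucket item == "high-risk" then acc + 1 else acc) 0
    let question : String := (((PySem.List.pyGet? breakdown idx).getD []).lookup "question").getD ""
    [("this_round", "本轮先处理第 " ++ PySem.Int.toStr (idx + 1) ++ " 个子问题：" ++ question ++ "。"),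
     ("selection_logic",
       "主问题按可执行性、起测锚点和短期判断价值选择，不按提问顺序机械取第一句。"
       ++ "其余问题中，可后续继续进入四术数的有 " ++ PySem.Int.toStr (max (executable_count - 1) 0) ++ " 题，"
       ++ "属于相邻体系的有 " ++ PySem.Int.toStr adjacent_count ++ " 题，需要先降风险的有 " ++ PySem.Int.toStr risk_count ++ " 题。"
       ++ (if supporting_fragments.isEmpty then "没有额外的补充信息片段。"
           else "另识别到 " ++ PySem.Int.toStr (PySem.List.len supporting_fragments) ++ " 条补充片段。"))]

-- ===== PORT B =====
-- one loop step: bump the component of the (e, a, r) triple matching the item's bucket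
def pvTallyStep (s : Int × Int × Int) (item : List (String × String)) : Int × Int × Int :=
  let b := (item.lookup "bucket").getD ""
  if b == "executable" then (s.1 + 1, s.2.1, s.2.2)
  else if b == "adjacent" then (s.1, s.2.1 + 1, s.2.2)
  else if b == "high-risk" then (s.1, s.2.1, s.2.2 + 1)
  else s

def build_compound_summary_alt (breakdown : List (List (String × String))) (primary_index : Option Int) (supporting_fragments : List String) : List (String × String) :=
  match primary_index with
  | none =>
    [("this_round", "这轮还没有选出可直接进入起测的主问题。"),
     ("selection_logic", "系统先做拆分，再按可执行性、起测锚点和短期判断价值排序。")]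
  | some idx =>
    let t : Int × Int × Int := breakdown.foldl pvTallyStep (0, 0, 0)
    let tail : String :=
      if supporting_fragments.isEmpty then "没有额外的补充信息片段。"
      else "另识别到 " ++ PySem.Int.toStr (PySem.List.len supporting_fragments) ++ " 条补充片段。"
    let parts : List String :=
      ["主问题按可执行性、起测锚点和短期判断价值选择，不按提问顺序机械取第一句。",
       "其余问题中，可后续继续进入四术数的有 ", PySem.Int.toStr (max (t.1 - 1) 0), " 题，",
       "属于相邻体系的有 ", PySem.Int.toStr t.2.1, " 题，需要先降风险的有 ", PySem.Int.toStr t.2.2, " 题。",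
       tail]
    let question : String := (((PySem.List.pyGet? breakdown idx).getD []).lookup "question").getD ""
    [("this_round", "本轮先处理第 " ++ PySem.Int.toStr (idx + 1) ++ " 个子问题：" ++ question ++ "。"),
     ("selection_logic", PySem.Str.join "" parts)]

-- ===== PRECONDITION & SPEC =====
-- Pre_ excludes exactly the inputs where Python A raises: a breakdown item without a
-- 'bucket' key (KeyError), primary_index out of range (IndexError), or the selected
-- item lacking a 'question' key (KeyError).
def Pre_build_compound_summary (breakdown : List (List (String × String))) (primary_index : Option Int) (supporting_fragments : List String) : Prop :=
  (primary_index.map (fun idx =>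
     breakdown.all (fun item => (item.lookup "bucket").isSome) &&
     ((PySem.List.pyGet? breakdown idx).map (fun item => (item.lookup "question").isSome)).getD false)).getD true = true
instance (breakdown : List (List (String × String))) (primary_index : Option Int) (supporting_fragments : List String) : Decidable (Pre_build_compound_summary breakdown primary_index supporting_fragments) := by unfold Pre_build_compound_summary; infer_instance

def pvWitness_build_compound_summary : (List (List (String × String))) × Option Int × List String :=
  ([[("bucket", "executable"), ("question", "q1")], [("bucket", "adjacent"), ("question", "q2")]], some 0, ["frag"])

def Spec_build_compound_summary (breakdown : List (List (String × String))) (primary_index : Option Int) (supporting_fragments : List String) (out : List (String × String)) : Prop := out = build_compound_summary_alt breakdown primary_index supporting_fragments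
instance (breakdown : List (List (String × String))) (primary_index : Option Int) (supporting_fragments : List String) (out : List (String × String)) : Decidable (Spec_build_compound_summary breakdown primary_index supporting_fragments out) := by unfold Spec_build_compound_summary; infer_instance

-- ===== CLAIM (what is proved, stated in full; the proofs are below) =====
def Claim_equal_build_compound_summary : Prop := ∀ (breakdown : List (List (String × String))) (primary_index : Option Int) (supporting_fragments : List String), Dom_build_compound_summary breakdown primary_index supporting_fragments → Pre_build_compound_summary breakdown primary_index supporting_fragments → Spec_build_compound_summary breakdown primary_index supporting_fragments (build_compound_summary breakdown primary_index supporting_fragments)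

-- ===== LEMMAS AND PROOFS =====

-- the triple-tally fold computes, componentwise, A's three per-bucket counting scans
theorem pvTally_eq (l : List (List (String × String))) (e a r : Int) :
    l.foldl pvTallyStep (e, a, r)
      = (l.foldl (fun acc item => if pvBucket item == "executable" then acc + 1 else acc) e,
         l.foldl (fun acc item => if pvBucket item == "adjacent" then acc + 1 else acc) a,
         l.foldl (fun acc item => if pvBucket item == "high-risk" then acc + 1 else acc) r) := by
  induction l generalizing e a r with
  | nil => rfl
  | cons x l ih =>
    simp only [List.foldl_cons, pvTallyStep, pvBucket]
    by_cases h1 : (x.lookup "bucket").getD "" = "executable"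
    · simp [h1, ih, pvBucket]
    · by_cases h2 : (x.lookup "bucket").getD "" = "adjacent"
      · simp [h1, h2, ih, pvBucket]
      · by_cases h3 : (x.lookup "bucket").getD "" = "high-risk"
        · simp [h1, h2, h3, ih, pvBucket]
        · simp [h1, h2, h3, ih, pvBucket]

-- ===== VERDICT (by name: the statement is the Claim_ definition above) =====
theorem build_compound_summary_spec : Claim_equal_build_compound_summary := by
  intro breakdown primary_index supporting_fragments _ _
  unfold Spec_build_compound_summary build_compound_summary build_compound_summary_alt
  cases primary_index with
  | none => rfl
  | some idx =>
    simp only [pvTally_eq]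
    refine List.cons_eq_cons.mpr ⟨rfl, List.cons_eq_cons.mpr ⟨?_, rfl⟩⟩
    refine Prod.ext rfl ?_
    apply String.toList_inj.mp
    simp [PySem.Str.join, PySem.Chars.join_cons_cons, String.toList_ofList, String.toList_append]
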